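-- pv_equiv track=rewrite | github.com/rajxyz/New_backendtricsk | routes/generate_template_sentence.py | extract_placeholders
-- ===== SOURCE A (Python) =====
-- def extract_placeholders(template: str) -> list:
--     placeholders = []
--
--     # Detect [placeholder]
--     start = 0
--     while True:
--         start = template.find('[', start)
--         if start == -1:
--             break
--         end = template.find(']', start)
--         if end == -1:
--             break
--         placeholders.append(template[start+1:end])
--         start = end + 1
--
--     # Detect {placeholder}
--     start = 0
--     while True:
--         start = template.find('{', start)
--         if start == -1:
--             break
--         end = template.find('}', start)
--         if end == -1:
--             break
--         placeholders.append(template[start+1:end])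
--         start = end + 1
--
--     return placeholders
-- ===== SOURCE B (Python) =====
-- def extract_placeholders(template: str) -> list:
--     # One pass over the characters with two independent little state machines
--     # (one for [...], one for {...}); no find() calls, no index arithmetic.
--     brackets, braces = [], []
--     buf1 = None
--     buf2 = None
--     for ch in template:
--         if buf1 is None:
--             if ch == '[':
--                 buf1 = ''
--         elif ch == ']':
--             brackets.append(buf1)
--             buf1 = None
--         else:
--             buf1 += ch
--         if buf2 is None:
--             if ch == '{':
--                 buf2 = ''
--         elif ch == '}':
--             braces.append(buf2)
--             buf2 = None
--         else:
--             buf2 += ch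
--     return brackets + braces
-- ===== Notes on version B (the rewrite author's own statement) =====
-- stated objective: alternative
-- what changed: A's two find()/while loops with explicit index state are replaced by a single character pass running two independent open/accumulate/close state machines (no find calls, no index arithmetic), concatenating the bracket results before the brace results.
import Mathlib
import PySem

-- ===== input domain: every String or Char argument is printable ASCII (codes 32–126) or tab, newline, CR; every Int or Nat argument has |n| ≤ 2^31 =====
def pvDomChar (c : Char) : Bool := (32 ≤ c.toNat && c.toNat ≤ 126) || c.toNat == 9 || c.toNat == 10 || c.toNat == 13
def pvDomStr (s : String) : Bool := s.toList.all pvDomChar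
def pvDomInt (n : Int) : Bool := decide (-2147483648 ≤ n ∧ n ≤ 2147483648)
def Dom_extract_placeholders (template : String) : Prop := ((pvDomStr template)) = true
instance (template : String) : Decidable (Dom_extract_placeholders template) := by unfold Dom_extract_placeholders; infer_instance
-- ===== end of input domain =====

-- B replaces A's two find/while index-scanning loops by a single character pass
-- running two independent open/accumulate/close state machines (objective: alternative).

-- ===== PORT A =====
-- A's while-loop: find(opn, start); find(cls, start); append slice; start = end+1.
-- `fuel` only makes the recursion structural; fuel = t.length + 1 is never exhausted
-- (each iteration moves `start` past the found closing bracket).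
def pvFindLoopA (t : List Char) (opn cls : Char) : Nat → Nat → List String → List String
  | 0, _, acc => acc
  | fuel + 1, start, acc =>
    let s := PySem.Chars.findFrom t [opn] (start : Int) none
    if s = -1 then acc
    else
      let e := PySem.Chars.findFrom t [cls] s none
      if e = -1 then acc
      else
        pvFindLoopA t opn cls fuel (e.toNat + 1)
          (acc ++ [String.ofList (PySem.Chars.slice t (some (s + 1)) (some e))])

def extract_placeholders (template : String) : List String :=
  let t := template.toList
  let p1 := pvFindLoopA t '[' ']' (t.length + 1) 0 []
  pvFindLoopA t '{' '}' (t.length + 1) 0 p1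

-- ===== PORT B =====
-- one step of B's per-bracket-kind state machine (buf = None ↔ outside a placeholder)
def pvMachineStep (opn cls : Char) : (List String × Option (List Char)) → Char → (List String × Option (List Char))
  | (res, none), ch => (res, if ch = opn then some [] else none)
  | (res, some b), ch =>
      if ch = cls then (res ++ [String.ofList b], none) else (res, some (b ++ [ch]))

def extract_placeholders_alt (template : String) : List String :=
  let st := template.toList.foldl
    (fun (p : (List String × Option (List Char)) × (List String × Option (List Char))) ch =>
      (pvMachineStep '[' ']' p.1 ch, pvMachineStep '{' '}' p.2 ch))
    (([], none), ([], none))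
  st.1.1 ++ st.2.1

-- ===== PRECONDITION & SPEC =====
def Spec_extract_placeholders (template : String) (out : List String) : Prop := out = extract_placeholders_alt template
instance (template : String) (out : List String) : Decidable (Spec_extract_placeholders template out) := by unfold Spec_extract_placeholders; infer_instance

-- ===== CLAIM (what is proved, stated in full; the proofs are below) =====
def Claim_equal_extract_placeholders : Prop := ∀ (template : String), Dom_extract_placeholders template → Spec_extract_placeholders template (extract_placeholders template)

-- ===== LEMMAS AND PROOFS =====

-- emit-style (accumulator-free) form of the state machine, used as the common spec
def pvM (opn cls : Char) : List Char → Option (List Char) → List String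
  | [], _ => []
  | ch :: r, none => pvM opn cls r (if ch = opn then some [] else none)
  | ch :: r, some b =>
      if ch = cls then String.ofList b :: pvM opn cls r none else pvM opn cls r (some (b ++ [ch]))

def pvNe (c : Char) : Char → Bool := fun x => x != c

-- ---- small list facts ----
lemma pv_drop_len_takeWhile (p : Char → Bool) (u : List Char) :
    u.drop (u.takeWhile p).length = u.dropWhile p := by
  calc u.drop (u.takeWhile p).length
      = (u.takeWhile p ++ u.dropWhile p).drop (u.takeWhile p).length := by
        rw [List.takeWhile_append_dropWhile]
    _ = u.dropWhile p := List.drop_left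

lemma pv_take_len_takeWhile (p : Char → Bool) (u : List Char) :
    u.take (u.takeWhile p).length = u.takeWhile p := by
  calc u.take (u.takeWhile p).length
      = (u.takeWhile p ++ u.dropWhile p).take (u.takeWhile p).length := by
        rw [List.takeWhile_append_dropWhile]
    _ = u.takeWhile p := List.take_left

lemma pv_dropWhile_ne_cons (c : Char) (u : List Char) (h : c ∈ u) :
    u.dropWhile (pvNe c) = c :: (u.dropWhile (pvNe c)).tail := by
  induction u with
  | nil => cases h
  | cons x r ih =>
    by_cases hx : x = c
    · subst hx; simp [pvNe]
    · have hr : c ∈ r := by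
        rcases List.mem_cons.mp h with h' | h'
        · exact absurd h'.symm hx
        · exact h'
      simpa [List.dropWhile_cons, pvNe, hx] using ih hr

lemma pv_singleton_prefix_iff (u : List Char) (j : Nat) (c : Char) :
    [c] <+: u.drop j ↔ u[j]? = some c := by
  constructor
  · rintro ⟨t, ht⟩
    have : (u.drop j)[0]? = some c := by rw [← ht]; rfl
    simpa [List.getElem?_drop] using this
  · intro h
    have hj : j < u.length := by
      by_contra hge
      rw [List.getElem?_eq_none (by omega)] at h
      cases h
    refine ⟨u.drop (j + 1), ?_⟩
    rw [List.drop_eq_getElem_cons hj]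
    have : u[j] = c := by
      have := List.getElem?_eq_getElem hj
      rw [h] at this; exact (Option.some.inj this).symm
    simp [this]

lemma pv_find_singleton (u : List Char) (c : Char) :
    PySem.Chars.find u [c] = if c ∈ u then ((u.takeWhile (pvNe c)).length : Int) else -1 := by
  by_cases hc : c ∈ u
  · rw [if_pos hc]
    have h0 : (0:Int) ≤ PySem.Chars.find u [c] :=
      (PySem.Chars.find_nonneg_iff u [c]).mpr ((List.singleton_infix_iff c u).mpr hc)
    obtain ⟨hpre, hmin⟩ := PySem.Chars.find_spec h0
    set j := (PySem.Chars.find u [c]).toNat with hj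
    set k := (u.takeWhile (pvNe c)).length with hk
    have hkpre : [c] <+: u.drop k := by
      rw [hk, pv_drop_len_takeWhile, pv_dropWhile_ne_cons c u hc]
      exact ⟨_, rfl⟩
    have hjk : j ≤ k := by
      by_contra hlt
      exact hmin k (by omega) hkpre
    have hkj : k ≤ j := by
      by_contra hlt
      rw [not_le] at hlt
      have hjc : u[j]? = some c := (pv_singleton_prefix_iff u j c).mp hpre
      have htk : (u.take k)[j]? = some c := by
        rw [List.getElem?_take, if_pos hlt, hjc]
      rw [hk, pv_take_len_takeWhile] at htk
      have hcmem : c ∈ u.takeWhile (pvNe c) := List.mem_of_getElem? htk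
      have := List.mem_takeWhile_imp hcmem
      simp [pvNe] at this
    have hjeqk : j = k := le_antisymm hjk hkj
    have : PySem.Chars.find u [c] = (j : Int) := (Int.toNat_of_nonneg h0).symm
    rw [this, hjeqk]
  · rw [if_neg hc]
    exact (PySem.Chars.find_eq_neg_one_iff u [c]).mpr
      (fun hinf => hc ((List.singleton_infix_iff c u).mp hinf))

-- ---- pvM structure lemmas ----
lemma pvM_none_of_not_mem (opn cls : Char) (u : List Char) (h : opn ∉ u) :
    pvM opn cls u none = [] := by
  induction u with
  | nil => rfl
  | cons x r ih =>
    simp only [List.mem_cons, not_or] at h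
    simp [pvM, Ne.symm h.1, ih h.2]

lemma pvM_some_of_not_mem (opn cls : Char) (u : List Char) (b : List Char) (h : cls ∉ u) :
    pvM opn cls u (some b) = [] := by
  induction u generalizing b with
  | nil => rfl
  | cons x r ih =>
    simp only [List.mem_cons, not_or] at h
    simp [pvM, Ne.symm h.1, ih _ h.2]

lemma pvM_skip (opn cls : Char) (w v : List Char) (h : opn ∉ w) :
    pvM opn cls (w ++ opn :: v) none = pvM opn cls v (some []) := by
  induction w with
  | nil => simp [pvM]
  | cons x r ih =>
    simp only [List.mem_cons, not_or] at h
    simp [pvM, Ne.symm h.1, ih h.2]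

lemma pvM_emit (opn cls : Char) (w v : List Char) (b : List Char) (h : cls ∉ w) :
    pvM opn cls (w ++ cls :: v) (some b) = String.ofList (b ++ w) :: pvM opn cls v none := by
  induction w generalizing b with
  | nil => simp [pvM]
  | cons x r ih =>
    simp only [List.mem_cons, not_or] at h
    simp [pvM, Ne.symm h.1, ih _ h.2]

-- ---- A-side: the find loop computes pvM on the remaining suffix ----
lemma pvFindLoopA_eq_pvM (t : List Char) (opn cls : Char) (hne : opn ≠ cls)
    (fuel start : Nat) (acc : List String)
    (hs : start ≤ t.length) (hf : t.length + 1 - start ≤ fuel) :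
    pvFindLoopA t opn cls fuel start acc = acc ++ pvM opn cls (t.drop start) none := by
  induction fuel generalizing start acc with
  | zero => omega
  | succ fuel ih =>
    have hlenu : (t.drop start).length = t.length - start := List.length_drop
    by_cases hop : opn ∈ t.drop start
    · -- outer find succeeds
      have hdw := pv_dropWhile_ne_cons opn (t.drop start) hop
      set k₁ := ((t.drop start).takeWhile (pvNe opn)).length with hk₁
      set v := ((t.drop start).dropWhile (pvNe opn)).tail with hv
      have hud : t.drop start = (t.drop start).takeWhile (pvNe opn) ++ opn :: v := by
        rw [← hdw, List.takeWhile_append_dropWhile]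
      have hlen2 : (t.drop start).length = k₁ + 1 + v.length := by
        rw [hud]; simp [hk₁]; omega
      have hfind1 : PySem.Chars.find (t.drop start) [opn] = (k₁ : Int) := by
        rw [pv_find_singleton, if_pos hop]
      have hff1 : PySem.Chars.findFrom t [opn] (start : Int) none = ((start + k₁ : Nat) : Int) := by
        rw [PySem.Chars.findFrom_natCast t [opn] start hs, hfind1]
        rw [if_neg (by omega)]
        push_cast; ring
      have hs2 : start + k₁ ≤ t.length := by omega
      have hdrop2 : t.drop (start + k₁) = opn :: v := by
        rw [← List.drop_drop, hk₁, pv_drop_len_takeWhile, hdw]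
      have hff2 : PySem.Chars.findFrom t [cls] ((start + k₁ : Nat) : Int) none =
          if PySem.Chars.find (opn :: v) [cls] = -1 then -1
          else ((start + k₁ : Nat) : Int) + PySem.Chars.find (opn :: v) [cls] := by
        rw [PySem.Chars.findFrom_natCast t [cls] (start + k₁) hs2, hdrop2]
      have htkc : (opn :: v).takeWhile (pvNe cls) = opn :: v.takeWhile (pvNe cls) := by
        simp [pvNe, hne]
      by_cases hcl : cls ∈ v
      · -- inner find succeeds
        set k₂ := (v.takeWhile (pvNe cls)).length with hk₂
        have hdwv := pv_dropWhile_ne_cons cls v hcl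
        set v₂ := (v.dropWhile (pvNe cls)).tail with hv₂
        have hvd : v = v.takeWhile (pvNe cls) ++ cls :: v₂ := by
          rw [← hdwv, List.takeWhile_append_dropWhile]
        have hlen3 : v.length = k₂ + 1 + v₂.length := by
          rw [hvd]; simp [hk₂]; omega
        have hfind2 : PySem.Chars.find (opn :: v) [cls] = ((k₂ + 1 : Nat) : Int) := by
          rw [pv_find_singleton, if_pos (by simp [hne.symm, hcl]), htkc]
          simp only [List.length_cons, ← hk₂]
        have hff2' : PySem.Chars.findFrom t [cls] ((start + k₁ : Nat) : Int) none =
            ((start + k₁ + k₂ + 1 : Nat) : Int) := by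
          rw [hff2, hfind2, if_neg (by omega)]
          push_cast; ring
        have hdrop3 : t.drop (start + k₁ + 1) = v := by
          have : t.drop (start + k₁ + 1) = (t.drop (start + k₁)).drop 1 := by
            rw [List.drop_drop]
          rw [this, hdrop2]; rfl
        have hslice : PySem.Chars.slice t (some (((start + k₁ : Nat) : Int) + 1))
            (some ((start + k₁ + k₂ + 1 : Nat) : Int)) = v.takeWhile (pvNe cls) := by
          have h1 : (((start + k₁ : Nat) : Int) + 1) = ((start + k₁ + 1 : Nat) : Int) := by push_cast; ring
          rw [h1, PySem.Chars.slice_eq_listSlice, PySem.List.slice_natCast, hdrop3]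
          have h2 : start + k₁ + k₂ + 1 - (start + k₁ + 1) = k₂ := by omega
          rw [h2, hk₂, pv_take_len_takeWhile]
        have hdrop4 : t.drop (start + k₁ + k₂ + 2) = v₂ := by
          have : t.drop (start + k₁ + k₂ + 2) = (t.drop (start + k₁ + 1)).drop (k₂ + 1) := by
            rw [List.drop_drop]; congr 1; omega
          rw [this, hdrop3, ← List.drop_drop, hk₂, pv_drop_len_takeWhile, hdwv]; rfl
        have hrec := ih (start + k₁ + k₂ + 2)
          (acc ++ [String.ofList (v.takeWhile (pvNe cls))]) (by omega) (by omega)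
        rw [hdrop4] at hrec
        -- unfold one step of the loop
        show (let s := PySem.Chars.findFrom t [opn] (start : Int) none
          if s = -1 then acc
          else
            let e := PySem.Chars.findFrom t [cls] s none
            if e = -1 then acc
            else
              pvFindLoopA t opn cls fuel (e.toNat + 1)
                (acc ++ [String.ofList (PySem.Chars.slice t (some (s + 1)) (some e))])) = _
        simp only [hff1, hff2']
        rw [if_neg (by omega), if_neg (by omega)]
        have het : ((start + k₁ + k₂ + 1 : Nat) : Int).toNat + 1 = start + k₁ + k₂ + 2 := by
          omega
        rw [hslice, het, hrec]
        conv_rhs => rw [hud, pvM_skip _ _ _ _ (fun hmem => by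
          have := List.mem_takeWhile_imp hmem; simp [pvNe] at this),
          hvd, pvM_emit _ _ _ _ _ (fun hmem => by
          have := List.mem_takeWhile_imp hmem; simp [pvNe] at this)]
        simp
      · -- no closing bracket after the opening one: loop stops
        have hfind2 : PySem.Chars.find (opn :: v) [cls] = -1 := by
          rw [pv_find_singleton, if_neg (by simp [hne.symm, hcl])]
        show (let s := PySem.Chars.findFrom t [opn] (start : Int) none
          if s = -1 then acc
          else
            let e := PySem.Chars.findFrom t [cls] s none
            if e = -1 then acc
            else
              pvFindLoopA t opn cls fuel (e.toNat + 1)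
                (acc ++ [String.ofList (PySem.Chars.slice t (some (s + 1)) (some e))])) = _
        simp only [hff1, hff2, hfind2]
        norm_num
        rw [hud]
        rw [pvM_skip _ _ _ _ (fun hmem => by
          have := List.mem_takeWhile_imp hmem; simp [pvNe] at this)]
        exact pvM_some_of_not_mem _ _ _ _ hcl
    · -- no opening bracket: loop stops
      have hfind1 : PySem.Chars.find (t.drop start) [opn] = -1 := by
        rw [pv_find_singleton, if_neg hop]
      have hff1 : PySem.Chars.findFrom t [opn] (start : Int) none = -1 := by
        rw [PySem.Chars.findFrom_natCast t [opn] start hs, hfind1]; simp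
      show (let s := PySem.Chars.findFrom t [opn] (start : Int) none
        if s = -1 then acc
        else
          let e := PySem.Chars.findFrom t [cls] s none
          if e = -1 then acc
          else
            pvFindLoopA t opn cls fuel (e.toNat + 1)
              (acc ++ [String.ofList (PySem.Chars.slice t (some (s + 1)) (some e))])) = _
      simp only [hff1]
      norm_num
      rw [pvM_none_of_not_mem _ _ _ hop]

-- ---- B-side: the fold computes pvM ----
lemma pv_fold_machine (opn cls : Char) (u : List Char) (res : List String) (buf : Option (List Char)) :
    (u.foldl (pvMachineStep opn cls) (res, buf)).1 = res ++ pvM opn cls u buf := by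
  induction u generalizing res buf with
  | nil => simp [pvM]
  | cons x r ih =>
    match buf with
    | none =>
      by_cases hx : x = opn <;> simp [pvMachineStep, pvM, hx, ih]
    | some b =>
      by_cases hx : x = cls <;> simp [pvMachineStep, pvM, hx, ih]

lemma pv_fold_pair (u : List Char)
    (p : (List String × Option (List Char)) × (List String × Option (List Char))) :
    u.foldl (fun p ch => (pvMachineStep '[' ']' p.1 ch, pvMachineStep '{' '}' p.2 ch)) p
      = (u.foldl (pvMachineStep '[' ']') p.1, u.foldl (pvMachineStep '{' '}') p.2) := by
  induction u generalizing p with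
  | nil => rfl
  | cons x r ih => simp [List.foldl_cons, ih]

-- ===== VERDICT (by name: the statement is the Claim_ definition above) =====
theorem extract_placeholders_spec : Claim_equal_extract_placeholders := by
  intro template _
  unfold Spec_extract_placeholders extract_placeholders extract_placeholders_alt
  rw [pv_fold_pair]
  simp only [pv_fold_machine]
  rw [pvFindLoopA_eq_pvM _ _ _ (by decide) _ _ _ (Nat.zero_le _) (by omega),
      pvFindLoopA_eq_pvM _ _ _ (by decide) _ _ _ (Nat.zero_le _) (by omega)]
  simp
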